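-- pv_equiv track=rewrite | github.com/hitaxim/leetcode-learnings | interview-prep-more/Ambiguous Coordinates.py | gen_nums
-- ===== SOURCE A (Python) =====
-- def gen_nums(s):
--     ans = []
--     if s == "0" or s[0] != "0":
--         ans.append(s)
--
--     if s[-1] == '0':
--         return ans
--
--     if s[0] == '0':
--         return ans + ['0.' + s[1:]]
--
--     for i in range(1, len(s)):
--         ans.append(s[:i] + '.' + s[i:])
--     return ans
-- ===== SOURCE B (Python) =====
-- def valid_int(x):
--     return x == '0' or x[0] != '0'
--
-- def valid_frac(x):
--     return x[-1] != '0'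
--
-- def gen_nums(s):
--     return ([s] if valid_int(s) else []) + \
--         [s[:i] + '.' + s[i:] for i in range(1, len(s))
--          if valid_int(s[:i]) and valid_frac(s[i:])]
-- ===== Notes on version B (the rewrite author's own statement) =====
-- stated objective: simpler
-- what changed: A's three special-case early-return branches plus trailing loop are replaced by one uniform filtered enumeration of every decimal placement guarded by two validity predicates (valid_int/valid_frac); Pre_ excludes only the empty string, on which both raise IndexError.
import Mathlib
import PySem

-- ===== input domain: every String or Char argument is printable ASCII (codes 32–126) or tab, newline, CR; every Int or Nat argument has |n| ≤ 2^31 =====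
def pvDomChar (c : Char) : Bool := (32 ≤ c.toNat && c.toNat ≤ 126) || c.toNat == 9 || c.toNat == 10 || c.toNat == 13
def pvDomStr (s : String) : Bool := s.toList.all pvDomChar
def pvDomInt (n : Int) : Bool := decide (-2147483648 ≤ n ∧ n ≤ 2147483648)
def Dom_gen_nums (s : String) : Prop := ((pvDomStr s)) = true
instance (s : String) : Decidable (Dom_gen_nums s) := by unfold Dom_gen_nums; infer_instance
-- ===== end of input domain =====

-- B replaces A's special-case early-return branches and loop by one uniform
-- filtered enumeration of decimal placements guarded by validity predicates (simpler decomposition, same cost).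


-- ===== PORT A =====
-- Literal transliteration of A: s[0]/s[-1] ported as headD/getLastD on s.toList; the
-- default is never reached inside Pre_ (s ≠ ""), exactly where Python raises IndexError.
def gen_nums (s : String) : List String :=
  let cs := s.toList
  let ans : List String := if s = "0" ∨ cs.headD ' ' ≠ '0' then [s] else []
  if cs.getLastD ' ' = '0' then ans
  else if cs.headD ' ' = '0' then
    ans ++ [String.ofList ('0' :: '.' :: cs.drop 1)]
  else
    (PySem.List.pyRange 1 (cs.length : Int) 1).foldl
      (fun acc i => acc ++ [String.ofList (cs.take i.toNat ++ '.' :: cs.drop i.toNat)]) ans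

-- ===== PORT B =====
-- valid_int(x) = (x == '0' or x[0] != '0')   (x[0] raises only on "", outside Pre_)
def pvValidInt (x : List Char) : Bool := x = ['0'] || x.headD ' ' != '0'
-- valid_frac(x) = (x[-1] != '0')
def pvValidFrac (x : List Char) : Bool := x.getLastD ' ' != '0'

def gen_nums_alt (s : String) : List String :=
  let cs := s.toList
  (if pvValidInt cs then [s] else []) ++
    (PySem.List.pyRange 1 (cs.length : Int) 1).filterMap
      (fun i =>
        if pvValidInt (cs.take i.toNat) && pvValidFrac (cs.drop i.toNat) then
          some (String.ofList (cs.take i.toNat ++ '.' :: cs.drop i.toNat))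
        else none)

-- ===== PRECONDITION & SPEC =====
-- Pre_ excludes only the empty string, on which A (s[0]) raises IndexError (B raises too).
def Pre_gen_nums (s : String) : Prop := s ≠ ""
instance (s : String) : Decidable (Pre_gen_nums s) := by unfold Pre_gen_nums; infer_instance
def pvWitness_gen_nums : String := ("123")
def Spec_gen_nums (s : String) (out : List String) : Prop := out = gen_nums_alt s
instance (s : String) (out : List String) : Decidable (Spec_gen_nums s out) := by unfold Spec_gen_nums; infer_instance

-- ===== CLAIM (what is proved, stated in full; the proofs are below) =====
def Claim_equal_gen_nums : Prop := ∀ (s : String), Dom_gen_nums s → Pre_gen_nums s → Spec_gen_nums s (gen_nums s)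

-- ===== LEMMAS AND PROOFS =====

theorem pv_foldl_append_map {α β : Type} (L : List α) (f : α → β) (ans : List β) :
    L.foldl (fun acc i => acc ++ [f i]) ans = ans ++ L.map f := by
  induction L generalizing ans with
  | nil => simp
  | cons x xs ih => simp [List.foldl, ih]

theorem pv_filterMap_ite_true {α β : Type} (L : List α) (p : α → Bool) (f : α → β)
    (h : ∀ i ∈ L, p i = true) :
    L.filterMap (fun i => if p i then some (f i) else none) = L.map f := by
  induction L with
  | nil => simp
  | cons x xs ih =>
    simp [h x (by simp), ih (fun i hi => h i (by simp [hi]))]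

theorem pv_filterMap_ite_false {α β : Type} (L : List α) (p : α → Bool) (f : α → β)
    (h : ∀ i ∈ L, p i = false) :
    L.filterMap (fun i => if p i then some (f i) else none) = [] := by
  induction L with
  | nil => simp
  | cons x xs ih =>
    simp [h x (by simp), ih (fun i hi => h i (by simp [hi]))]

theorem pv_getLast?_drop {α : Type} (l : List α) (k : Nat) (h : k < l.length) :
    (l.drop k).getLast? = l.getLast? := by
  induction l generalizing k with
  | nil => simp at h
  | cons x xs ih =>
    cases k with
    | zero => simp
    | succ m =>
      have hm : m < xs.length := by simpa using h
      rw [List.drop_succ_cons, ih m hm]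
      cases xs with
      | nil => simp at hm
      | cons y ys => simp

-- ===== VERDICT (by name: the statement is the Claim_ definition above) =====
theorem gen_nums_spec : Claim_equal_gen_nums := by
  intro s _ hpre
  unfold Spec_gen_nums gen_nums gen_nums_alt
  cases hcs : s.toList with
  | nil =>
    have h0 : String.ofList s.toList = s := String.ofList_toList
    rw [hcs] at h0
    exact absurd h0.symm hpre
  | cons c t =>
    have h0 : String.ofList s.toList = s := String.ofList_toList
    have hz : (s = "0") ↔ (c :: t = ['0']) := by
      constructor
      · intro h; rw [← hcs, h]; decide
      · intro h; rw [← h0, hcs, h]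
    have hAB : (s = "0" ∨ (c :: t).headD ' ' ≠ '0') ↔ pvValidInt (c :: t) = true := by
      simp [pvValidInt, hz]
    simp only [hcs]
    by_cases hl : (c :: t).getLastD ' ' = '0'
    · -- trailing zero: B's filter kills every split form; whole numbers coincide
      have hl' : (c :: t).getLast?.getD ' ' = '0' := by
        rw [← List.getLastD_eq_getLast?]; exact hl
      rw [if_pos hl,
        pv_filterMap_ite_false _ _ _ (by
          intro i hi
          have hmem := (PySem.List.mem_pyRange_one).1 hi
          have h2 : i.toNat < (c :: t).length := by
            simp only [List.length_cons] at hmem ⊢; omega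
          have hdrop : ((c :: t).drop i.toNat).getLast? = (c :: t).getLast? :=
            pv_getLast?_drop _ _ h2
          simp [pvValidFrac, List.getLastD_eq_getLast?, hdrop, hl']),
        List.append_nil]
      simp only [hAB]
    · have hl' : ¬ (c :: t).getLast?.getD ' ' = '0' := by
        rw [← List.getLastD_eq_getLast?]; exact hl
      rw [if_neg hl]
      by_cases hh : c = '0'
      · -- leading zero (and not "0"): only the '0.rest' split survives in B
        subst hh
        have ht : t ≠ [] := by intro h; subst h; exact hl rfl
        have hne : ¬ (s = "0" ∨ ('0' :: t).headD ' ' ≠ '0') := by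
          simp [hz]; intro h; exact ht (by simpa using h)
        have hvi : pvValidInt ('0' :: t) = false := by simp [pvValidInt, ht]
        have htl : 0 < t.length := List.length_pos_of_ne_nil ht
        have hlen : (1 : Int) < (((('0' :: t)).length : Nat) : Int) := by
          simp only [List.length_cons]; push_cast; omega
        have hlast : t.getLast? = ('0' :: t).getLast? := by
          cases t with | nil => exact absurd rfl ht | cons y ys => simp
        have h1cond : (pvValidInt (('0' :: t).take (1 : Int).toNat) &&
            pvValidFrac (('0' :: t).drop (1 : Int).toNat)) = true := by
          show (pvValidInt ['0'] && pvValidFrac t) = true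
          simp [pvValidInt, pvValidFrac, List.getLastD_eq_getLast?, hlast, hl']
        rw [if_pos (show ('0' :: t).headD ' ' = '0' from rfl), if_neg hne,
          PySem.List.pyRange_one_cons hlen, List.filterMap_cons, h1cond,
          pv_filterMap_ite_false _ _ _ (by
            intro i hi
            have hmem := (PySem.List.mem_pyRange_one).1 hi
            obtain ⟨m, hm⟩ : ∃ m, i.toNat = m + 2 := ⟨i.toNat - 2, by omega⟩
            have htake : ('0' :: t).take i.toNat = '0' :: t.take (m + 1) := by
              rw [hm]; simp [List.take_succ_cons]
            cases t with
            | nil => exact absurd rfl ht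
            | cons y ys =>
              simp only [htake, List.take_succ_cons, pvValidInt]
              simp)]
        simp [hvi]
      · -- no leading zero, no trailing zero: every split survives in both
        have hpos : pvValidInt (c :: t) = true := by simp [pvValidInt, hh]
        rw [if_neg (show ¬ (c :: t).headD ' ' = '0' from by simpa using hh),
          if_pos (hAB.2 hpos),
          pv_foldl_append_map,
          pv_filterMap_ite_true _ _ _ (by
            intro i hi
            have hmem := (PySem.List.mem_pyRange_one).1 hi
            have h2 : i.toNat < (c :: t).length := by
              simp only [List.length_cons] at hmem ⊢; omega
            obtain ⟨m, hm⟩ : ∃ m, i.toNat = m + 1 := ⟨i.toNat - 1, by omega⟩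
            have hdrop : ((t.drop m).getLast? = (c :: t).getLast?) := by
              have hd := pv_getLast?_drop (c :: t) i.toNat h2
              rw [hm] at hd; simpa using hd
            simp [pvValidInt, pvValidFrac, hm, List.take_succ_cons,
              List.getLastD_eq_getLast?, hdrop, hl', hh])]
        simp [hpos]
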